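-- pv_equiv track=rewrite | github.com/xliry/desloppify | desloppify/engine/_plan/promoted_ids.py | promoted_insertion_index
-- ===== SOURCE A (Python) =====
-- from typing import Any
--
-- def _promoted_ids(plan: dict[str, Any]) -> list[str]:
--     promoted = plan.get("promoted_ids")
--     if isinstance(promoted, list):
--         return promoted
--     promoted = []
--     plan["promoted_ids"] = promoted
--     return promoted
--
-- def promoted_insertion_index(order: list[str], plan: dict[str, Any]) -> int:
--     """Return insertion index immediately after the last promoted item."""
--     promoted = set(_promoted_ids(plan))
--     if not promoted:
--         return 0
--     last_idx = -1
--     for idx, issue_id in enumerate(order):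
--         if issue_id in promoted:
--             last_idx = idx
--     return last_idx + 1 if last_idx >= 0 else 0
-- ===== SOURCE B (Python) =====
-- def _promoted_ids(plan):
--     promoted = plan.get("promoted_ids")
--     if isinstance(promoted, list):
--         return promoted
--     promoted = []
--     plan["promoted_ids"] = promoted
--     return promoted
--
-- def promoted_insertion_index(order, plan):
--     """Return insertion index immediately after the last promoted item."""
--     promoted = set(_promoted_ids(plan))
--     for idx in range(len(order) - 1, -1, -1):
--         if order[idx] in promoted:
--             return idx + 1
--     return 0
-- ===== Notes on version B (the rewrite author's own statement) =====
-- stated objective: simpler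
-- what changed: B scans the order list backwards and returns at the first promoted item instead of a full forward pass tracking the last match, dropping the empty-set guard and the sentinel last_idx = -1.
import Mathlib
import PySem

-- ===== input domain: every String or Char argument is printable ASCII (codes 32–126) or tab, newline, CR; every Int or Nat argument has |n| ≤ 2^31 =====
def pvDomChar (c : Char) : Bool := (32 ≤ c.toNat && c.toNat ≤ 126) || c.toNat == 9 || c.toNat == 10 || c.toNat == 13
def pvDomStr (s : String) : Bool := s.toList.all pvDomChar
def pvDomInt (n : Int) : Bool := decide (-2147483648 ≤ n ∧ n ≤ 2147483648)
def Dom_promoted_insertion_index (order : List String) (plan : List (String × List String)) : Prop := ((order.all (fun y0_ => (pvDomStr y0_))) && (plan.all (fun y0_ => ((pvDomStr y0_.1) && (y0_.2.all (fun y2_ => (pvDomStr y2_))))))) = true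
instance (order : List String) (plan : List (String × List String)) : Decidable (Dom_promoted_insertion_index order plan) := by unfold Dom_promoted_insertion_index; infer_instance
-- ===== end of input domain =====

-- B differs from A only in traversal: a backward scan with early exit instead of a
-- forward pass tracking the last match.  Equivalence is about the RETURN value only:
-- in Python both A and B insert plan["promoted_ids"] = [] when the key is absent
-- (B reuses the same _promoted_ids helper, so the side effect is identical).

-- ===== PORT A =====
-- _promoted_ids: first-match lookup of "promoted_ids" in the association list, default [].
-- (The typed domain makes every stored value a list, so the isinstance branch is the lookup-hit case;
-- the mutation branch only returns [].)
def pv_promoted_ids (plan : List (String × List String)) : List String :=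
  ((plan.find? (fun kv => kv.1 == "promoted_ids")).map (·.2)).getD []

def promoted_insertion_index (order : List String) (plan : List (String × List String)) : Int :=
  let promoted : PySem.Set String := PySem.Set.ofList (pv_promoted_ids plan)
  if promoted = [] then 0
  else
    let last_idx : Int :=
      (PySem.List.enumerate order 0).foldl
        (fun acc p => if PySem.Set.contains promoted p.2 then p.1 else acc) (-1)
    if last_idx ≥ 0 then last_idx + 1 else 0

-- ===== PORT B =====
-- the 'for idx in range(len(order)-1, -1, -1): if order[idx] in promoted: return idx+1' loop;
-- order[idx] is pyGetD (exact: every index produced by the range is in range).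
def piiScanRev (order : List String) (promoted : PySem.Set String) : List Int → Int
  | [] => 0
  | i :: rest =>
      if PySem.Set.contains promoted (PySem.List.pyGetD order i "") then i + 1
      else piiScanRev order promoted rest

def promoted_insertion_index_alt (order : List String) (plan : List (String × List String)) : Int :=
  let promoted : PySem.Set String := PySem.Set.ofList (pv_promoted_ids plan)
  piiScanRev order promoted (PySem.List.pyRange ((order.length : Int) - 1) (-1) (-1))

-- ===== PRECONDITION & SPEC =====
def Spec_promoted_insertion_index (order : List String) (plan : List (String × List String)) (out : Int) : Prop := out = promoted_insertion_index_alt order plan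
instance (order : List String) (plan : List (String × List String)) (out : Int) : Decidable (Spec_promoted_insertion_index order plan out) := by unfold Spec_promoted_insertion_index; infer_instance

-- ===== CLAIM (what is proved, stated in full; the proofs are below) =====
def Claim_equal_promoted_insertion_index : Prop := ∀ (order : List String) (plan : List (String × List String)), Dom_promoted_insertion_index order plan → Spec_promoted_insertion_index order plan (promoted_insertion_index order plan)

-- ===== LEMMAS AND PROOFS =====

-- the backward scan ignores indices that lie inside the untouched prefix
theorem piiScanRev_append (order : List String) (x : String) (s : PySem.Set String)
    (idxs : List Int) (h : ∀ i ∈ idxs, 0 ≤ i ∧ i < (order.length : Int)) :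
    piiScanRev (order ++ [x]) s idxs = piiScanRev order s idxs := by
  induction idxs with
  | nil => rfl
  | cons i rest ih =>
      obtain ⟨h0, hlt⟩ := h i (List.mem_cons_self ..)
      have hget : PySem.List.pyGetD (order ++ [x]) i "" = PySem.List.pyGetD order i "" := by
        rw [PySem.List.pyGetD_eq_getElem (order ++ [x]) "" h0 (by simp; omega),
            PySem.List.pyGetD_eq_getElem order "" h0 hlt]
        rw [List.getElem_append_left (by omega)]
      simp only [piiScanRev, hget]
      rw [ih (fun j hj => h j (List.mem_cons_of_mem _ hj))]

-- scanning with an empty set finds nothing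
theorem piiScanRev_empty (order : List String) (idxs : List Int) :
    piiScanRev order ([] : PySem.Set String) idxs = 0 := by
  induction idxs with
  | nil => rfl
  | cons i rest ih => simpa [piiScanRev, PySem.Set.contains] using ih

-- core: forward last-match fold = backward first-match scan, by induction from the right
theorem pii_core (s : PySem.Set String) (order : List String) :
    (if (PySem.List.enumerate order 0).foldl
          (fun acc p => if PySem.Set.contains s p.2 then p.1 else acc) (-1 : Int) ≥ 0
     then (PySem.List.enumerate order 0).foldl
          (fun acc p => if PySem.Set.contains s p.2 then p.1 else acc) (-1 : Int) + 1
     else 0)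
    = piiScanRev order s (PySem.List.pyRange ((order.length : Int) - 1) (-1) (-1)) := by
  induction order using List.reverseRecOn with
  | nil =>
      rw [PySem.List.pyRange_neg_one_eq_nil (by norm_num)]
      simp [PySem.List.enumerate, piiScanRev]
  | append_singleton order x ih =>
      have hn : (0 : Int) ≤ (order.length : Int) := by positivity
      have henum : PySem.List.enumerate (order ++ [x]) 0
          = PySem.List.enumerate order 0 ++ [((order.length : Int), x)] := by
        simpa using PySem.List.enumerate_append order [x] 0
      have hrange : PySem.List.pyRange (((order ++ [x]).length : Int) - 1) (-1) (-1)
          = (order.length : Int) :: PySem.List.pyRange ((order.length : Int) - 1) (-1) (-1) := by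
        have : (((order ++ [x]).length : Int) - 1) = (order.length : Int) := by
          simp
        rw [this, PySem.List.pyRange_neg_one_cons (by omega)]
      have hget : PySem.List.pyGetD (order ++ [x]) (order.length : Int) "" = x := by
        rw [PySem.List.pyGetD_eq_getElem (order ++ [x]) "" hn (by simp)]
        simp
      rw [hrange]
      simp only [piiScanRev, hget, henum, List.foldl_append, List.foldl_cons, List.foldl_nil]
      by_cases hm : s.contains x = true
      · have hm' : x ∈ s := by simpa using hm
        simp [hm']
      · simp only [hm]
        rw [piiScanRev_append order x s _ (by
          intro i hi
          have := (PySem.List.mem_pyRange_neg_one).1 hi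
          omega)]
        simpa using ih

-- ===== VERDICT (by name: the statement is the Claim_ definition above) =====
theorem promoted_insertion_index_spec : Claim_equal_promoted_insertion_index := by
  intro order plan _
  show promoted_insertion_index order plan = promoted_insertion_index_alt order plan
  unfold promoted_insertion_index promoted_insertion_index_alt
  set s : PySem.Set String := PySem.Set.ofList (pv_promoted_ids plan) with hs
  by_cases he : s = []
  · simp [he, piiScanRev_empty]
  · simp only [if_neg he]
    exact pii_core s order
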